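-- pv_equiv track=rewrite | github.com/mattbruv/Project-Euler | src/problem37.py | truncRight
-- ===== SOURCE A (Python) =====
-- def truncRight(number):
--     ls = [int(x) for x in str(number)]
--     nums = []
--     for i in range(0, len(ls)):
--         n = int(''.join(map(str, ls)))
--         nums.append(n)
--         ls.pop()
--     return nums
-- ===== SOURCE B (Python) =====
-- def truncRight(number):
--     s = str(number)
--     return [int(s[:k]) for k in range(len(s), 0, -1)]
-- ===== Notes on version B (the rewrite author's own statement) =====
-- stated objective: simpler
-- what changed: B takes shrinking prefixes of str(number) directly with one slicing comprehension instead of building a digit-int list and repeatedly re-joining and popping it.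
import Mathlib
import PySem

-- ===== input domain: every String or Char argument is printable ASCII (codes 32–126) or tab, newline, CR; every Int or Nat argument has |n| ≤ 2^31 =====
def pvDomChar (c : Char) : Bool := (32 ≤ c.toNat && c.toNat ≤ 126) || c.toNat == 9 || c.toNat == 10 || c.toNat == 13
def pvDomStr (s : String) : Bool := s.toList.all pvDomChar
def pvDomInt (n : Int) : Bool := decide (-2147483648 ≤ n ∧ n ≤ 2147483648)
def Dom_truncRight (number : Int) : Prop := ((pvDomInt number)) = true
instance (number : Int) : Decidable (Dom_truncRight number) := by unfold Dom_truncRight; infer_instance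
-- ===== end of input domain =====

-- B lists the right-truncations as shrinking prefixes of str(number) in one slicing comprehension,
-- instead of A's digit-int list that is re-stringified, joined and popped each iteration (objective: simpler).

-- ===== PORT A =====
-- the for-loop: runs len(ls) times; each pass re-joins ls into a string, converts, appends, pops
def truncRightLoop (fuel : Nat) (ls : List Int) (nums : List Int) : List Int :=
  match fuel with
  | 0 => nums
  | f + 1 =>
    let n := (PySem.Int.ofStr? (PySem.Str.join "" (ls.map PySem.Int.toStr))).getD 0
    truncRightLoop f ls.dropLast (nums ++ [n])

-- int(x) on a 1-char string: ofStr?; .getD 0 is unreachable under Pre_ (every char is a digit)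
def truncRight (number : Int) : List Int :=
  let ls := (PySem.Int.toStr number).toList.map (fun x => (PySem.Int.ofStr? (String.ofList [x])).getD 0)
  truncRightLoop ls.length ls []

-- ===== PORT B =====
-- int(s[:k]) for k in range(len(s), 0, -1); .getD 0 unreachable under Pre_
def truncRight_alt (number : Int) : List Int :=
  let s := PySem.Int.toStr number
  (PySem.List.pyRange (PySem.Str.len s) 0 (-1)).map
    (fun k => (PySem.Int.ofStr? (PySem.Str.slice s none (some k))).getD 0)

-- ===== PRECONDITION & SPEC =====
-- Pre_ excludes negative numbers: there str(number) contains '-', so A's int(x) per character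
-- raises ValueError (B's int('') / int('-') raises too).
def Pre_truncRight (number : Int) : Prop := 0 ≤ number
instance (number : Int) : Decidable (Pre_truncRight number) := by unfold Pre_truncRight; infer_instance
def pvWitness_truncRight : Int := 120

def Spec_truncRight (number : Int) (out : List Int) : Prop := out = truncRight_alt number
instance (number : Int) (out : List Int) : Decidable (Spec_truncRight number out) := by unfold Spec_truncRight; infer_instance

-- ===== CLAIM (what is proved, stated in full; the proofs are below) =====
def Claim_equal_truncRight : Prop := ∀ (number : Int), Dom_truncRight number → Pre_truncRight number → Spec_truncRight number (truncRight number)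

-- ===== LEMMAS AND PROOFS =====

theorem pv_digitChar_mem (k : Nat) (h : k < 10) :
    Nat.digitChar k ∈ ['0','1','2','3','4','5','6','7','8','9'] := by
  interval_cases k <;> decide

theorem pv_toDigitsCore_digits (fuel : Nat) : ∀ (n : Nat) (acc : List Char),
    (∀ c ∈ acc, c ∈ ['0','1','2','3','4','5','6','7','8','9']) →
    ∀ c ∈ Nat.toDigitsCore 10 fuel n acc, c ∈ ['0','1','2','3','4','5','6','7','8','9'] := by
  induction fuel with
  | zero => intro n acc hacc; simpa [Nat.toDigitsCore] using hacc
  | succ f ih =>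
    intro n acc hacc c hc
    rw [Nat.toDigitsCore.eq_def] at hc
    simp only at hc
    split at hc
    · rcases List.mem_cons.mp hc with h | h
      · subst h; exact pv_digitChar_mem _ (Nat.mod_lt _ (by norm_num))
      · exact hacc _ h
    · refine ih _ _ ?_ _ hc
      intro d hd
      rcases List.mem_cons.mp hd with h | h
      · subst h; exact pv_digitChar_mem _ (Nat.mod_lt _ (by norm_num))
      · exact hacc _ h

theorem pv_toChars_digits (n : Int) (h : 0 ≤ n) :
    ∀ c ∈ PySem.Int.toChars n, c ∈ ['0','1','2','3','4','5','6','7','8','9'] := by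
  unfold PySem.Int.toChars Nat.toDigits
  rw [if_neg (by omega)]
  exact pv_toDigitsCore_digits _ _ _ (by simp)

-- str(int(c)) round-trips a digit character
theorem pv_char_round (c : Char) (h : c ∈ ['0','1','2','3','4','5','6','7','8','9']) :
    (PySem.Int.toStr ((PySem.Int.ofStr? (String.ofList [c])).getD 0)).toList = [c] := by
  fin_cases h <;> decide

theorem pv_joined_toList (cs : List Char)
    (hd : ∀ c ∈ cs, c ∈ ['0','1','2','3','4','5','6','7','8','9']) :
    (PySem.Str.join ""
      ((cs.map (fun x => (PySem.Int.ofStr? (String.ofList [x])).getD 0)).map PySem.Int.toStr)).toList = cs := by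
  rw [PySem.Str.toList_join]
  have : (((cs.map (fun x => (PySem.Int.ofStr? (String.ofList [x])).getD 0)).map PySem.Int.toStr).map String.toList)
      = cs.map (fun c => [c]) := by
    simp only [List.map_map]
    exact List.map_congr_left (fun c hc => pv_char_round c (hd c hc))
  rw [this]
  simpa using PySem.Chars.join_nil_singletons cs

theorem pv_loopA (L : Nat) : ∀ (cs : List Char) (nums : List Int), cs.length = L →
    (∀ c ∈ cs, c ∈ ['0','1','2','3','4','5','6','7','8','9']) →
    truncRightLoop L (cs.map (fun x => (PySem.Int.ofStr? (String.ofList [x])).getD 0)) nums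
      = nums ++ (List.range L).map (fun k => (PySem.Int.ofChars? (cs.take (L - k))).getD 0) := by
  induction L with
  | zero => intro cs nums _ _; simp [truncRightLoop]
  | succ L ih =>
    intro cs nums hlen hd
    simp only [truncRightLoop]
    rw [← List.map_dropLast]
    rw [ih cs.dropLast _ (by simp [hlen]) (fun c hc => hd c (List.dropLast_subset cs hc))]
    rw [PySem.Int.ofStr?.eq_1, pv_joined_toList cs hd]
    rw [List.range_succ_eq_map]
    simp only [List.map_cons, List.map_map, List.append_assoc, List.singleton_append]
    congr 1
    congr 1
    · rw [List.take_of_length_le (by omega)]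
    · apply List.map_congr_left
      intro k _
      have h1 : L + 1 - Nat.succ k = L - k := by omega
      have h2 : cs.dropLast.take (L - k) = cs.take (L - k) := by
        rw [List.dropLast_eq_take, hlen]
        simp only [Nat.add_sub_cancel]
        rw [List.take_take]
        congr 1
        omega
      simp [Function.comp, h1, h2]

theorem pv_pyRange_desc (L : Nat) :
    PySem.List.pyRange (L : Int) 0 (-1) = (List.range L).map (fun k => ((L - k : Nat) : Int)) := by
  unfold PySem.List.pyRange
  rw [if_neg (by norm_num), if_neg (by norm_num)]
  by_cases h0 : (0 : Int) < (L : Int)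
  · rw [if_pos h0]
    have hc : ((L : Int) - 0 + - -1 - 1) / - -1 = (L : Int) := by norm_num
    rw [hc, Int.toNat_natCast]
    apply List.map_congr_left
    intro k hk
    have hkL := List.mem_range.mp hk
    push_cast [Nat.cast_sub (le_of_lt hkL)]
    ring
  · rw [if_neg h0]
    have hL : L = 0 := by omega
    simp [hL]

theorem pv_altB (number : Int) :
    truncRight_alt number
      = (List.range (PySem.Int.toStr number).toList.length).map
          (fun k => (PySem.Int.ofChars? ((PySem.Int.toStr number).toList.take
              ((PySem.Int.toStr number).toList.length - k))).getD 0) := by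
  unfold truncRight_alt
  simp only [PySem.Str.len_eq]
  rw [pv_pyRange_desc, List.map_map]
  apply List.map_congr_left
  intro k _
  simp only [Function.comp_apply]
  rw [PySem.Int.ofStr?.eq_1, PySem.Str.toList_slice, PySem.Chars.slice_eq_listSlice,
    PySem.List.slice_to_natCast]

-- ===== VERDICT (by name: the statement is the Claim_ definition above) =====
theorem truncRight_spec : Claim_equal_truncRight := by
  intro number _ hpre
  unfold Spec_truncRight truncRight
  simp only []
  rw [List.length_map,
    pv_loopA _ _ _ rfl (fun c hc => pv_toChars_digits number hpre c (by simpa [PySem.Int.toList_toStr] using hc)),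
    pv_altB number]
  simp
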